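-- pv_equiv track=rewrite | github.com/hsusulist/Rux | main.py | _compact_history
-- ===== SOURCE A (Python) =====
-- MAX_HISTORY_TURNS = 8  # keep last N user+assistant turns verbatim
--
-- MAX_MSG_CHARS = 8000   # truncate very long single messages
--
-- def _compact_history(history):
--     """Trim chat history sent to the AI to control cost.
--     Strategy: keep the last MAX_HISTORY_TURNS turns (user+assistant pairs)
--     verbatim. Everything older is replaced with a single short summary note
--     so the AI still has continuity without re-sending (and re-paying for)
--     every old message every turn. Long individual messages are truncated.
--     """
--     if not history:
--         return [], 0
--     # Walk backwards collecting up to N user-role anchors.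
--     keep_idx = 0
--     user_seen = 0
--     for i in range(len(history) - 1, -1, -1):
--         m = history[i]
--         if isinstance(m, dict) and m.get("role") == "user":
--             user_seen += 1
--             if user_seen >= MAX_HISTORY_TURNS:
--                 keep_idx = i
--                 break
--     older = history[:keep_idx]
--     recent = history[keep_idx:]
--     trimmed_older_count = len(older)
--
--     out = []
--     if older:
--         # Compact summary stub — does not call the AI, just lists topics
--         # cheaply from user turns so the model has continuity context.
--         topics = []
--         for m in older:
--             if isinstance(m, dict) and m.get("role") == "user":
--                 c = m.get("content", "")
--                 if isinstance(c, str):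
--                     topics.append(c.strip().split("\n")[0][:80])
--         topic_blurb = " · ".join(topics[-6:]) if topics else "earlier discussion"
--         out.append({
--             "role": "user",
--             "content": f"[Earlier in this conversation ({trimmed_older_count} messages): {topic_blurb}]",
--         })
--         out.append({
--             "role": "assistant",
--             "content": "Got it, continuing from where we left off.",
--         })
--
--     # Truncate any oversized individual message
--     for m in recent:
--         if isinstance(m, dict) and isinstance(m.get("content"), str) and len(m["content"]) > MAX_MSG_CHARS:
--             mc = dict(m)
--             mc["content"] = m["content"][:MAX_MSG_CHARS] + "\n\n... [truncated to control cost]"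
--             out.append(mc)
--         else:
--             out.append(m)
--     return out, trimmed_older_count
-- ===== SOURCE B (Python) =====
-- MAX_HISTORY_TURNS = 8  # keep last N user+assistant turns verbatim
--
-- MAX_MSG_CHARS = 8000   # truncate very long single messages
--
--
-- def _truncated(m):
--     c = m.get("content") if isinstance(m, dict) else None
--     if isinstance(c, str) and len(c) > MAX_MSG_CHARS:
--         mc = dict(m)
--         mc["content"] = c[:MAX_MSG_CHARS] + "\n\n... [truncated to control cost]"
--         return mc
--     return m
--
--
-- def _compact_history(history):
--     if not history:
--         return [], 0
--     # Group the history into turns: every user message opens a new turn;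
--     # any messages before the first user message form a preamble group.
--     preamble, turns = [], []
--     for m in history:
--         if isinstance(m, dict) and m.get("role") == "user":
--             turns.append([m])
--         elif turns:
--             turns[-1].append(m)
--         else:
--             preamble.append(m)
--     dropped = []
--     if len(turns) >= MAX_HISTORY_TURNS:
--         dropped = turns[:len(turns) - MAX_HISTORY_TURNS]
--         older = preamble + [m for t in dropped for m in t]
--         recent = [m for t in turns[len(turns) - MAX_HISTORY_TURNS:] for m in t]
--     else:
--         older, recent = [], history
--
--     out = []
--     if older:
--         # Topics are exactly the opening (user) messages of the dropped turns.
--         topics = [t[0].get("content", "").strip().split("\n")[0][:80]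
--                   for t in dropped if isinstance(t[0].get("content", ""), str)]
--         blurb = " · ".join(topics[-6:]) if topics else "earlier discussion"
--         out = [{"role": "user",
--                 "content": f"[Earlier in this conversation ({len(older)} messages): {blurb}]"},
--                {"role": "assistant",
--                 "content": "Got it, continuing from where we left off."}]
--     return out + [_truncated(m) for m in recent], len(older)
-- ===== Notes on version B (the rewrite author's own statement) =====
-- stated objective: alternative
-- what changed: Instead of scanning backwards for the 8th-from-last user anchor and slicing at that index, B groups the history into user-led turn segments (plus a preamble), keeps the last 8 segments verbatim and summarizes the dropped segments, reading each topic from a dropped segment's opening message.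
import Mathlib
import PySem

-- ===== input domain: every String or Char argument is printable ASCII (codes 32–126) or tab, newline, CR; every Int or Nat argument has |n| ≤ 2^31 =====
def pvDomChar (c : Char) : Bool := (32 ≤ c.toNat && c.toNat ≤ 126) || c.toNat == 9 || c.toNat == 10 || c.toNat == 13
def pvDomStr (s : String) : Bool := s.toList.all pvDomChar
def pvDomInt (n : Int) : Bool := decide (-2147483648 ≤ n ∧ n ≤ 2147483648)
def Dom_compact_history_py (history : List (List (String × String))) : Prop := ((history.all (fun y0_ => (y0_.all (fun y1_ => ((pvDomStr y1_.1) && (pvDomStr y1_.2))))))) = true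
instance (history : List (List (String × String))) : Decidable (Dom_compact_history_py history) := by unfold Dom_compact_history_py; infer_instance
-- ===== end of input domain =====

-- B replaces A's backward anchor scan + index slicing by grouping the history into user-led
-- turn segments and keeping the last 8 segments (alternative decomposition, same cost).
-- Messages are dicts under the type convention, so Python's isinstance guards on dicts/str
-- values are always true; the ports note this where it matters.

-- ===== PORT A =====
-- A's backward index loop with break: structural recursion over the index list, same state (keep_idx, user_seen).
def pvAwalk (history : List (List (String × String))) : List Int → Int → Int → Int
  | [], keep_idx, _user_seen => keep_idx
  | i :: rest, keep_idx, user_seen =>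
    let m := PySem.List.pyGetD history i []   -- history[i]; i is always in range here
    if (PySem.Dict.mk m).get? "role" == some "user" then
      if 8 ≤ user_seen + 1 then i             -- keep_idx = i; break
      else pvAwalk history rest keep_idx (user_seen + 1)
    else pvAwalk history rest keep_idx user_seen

-- topics loop body (isinstance(c, str) is always true: values are str)
def pvAtopicsStep (topics : List String) (m : List (String × String)) : List String :=
  if (PySem.Dict.mk m).get? "role" == some "user" then
    let c := (PySem.Dict.mk m).getD "content" ""
    topics ++ [PySem.Str.slice (((PySem.Str.split? (PySem.Str.strip c) "\n").getD []).getD 0 "") none (some 80)]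
  else topics

-- truncation loop body (isinstance(m.get("content"), str) = the key is present)
def pvAoutStep (out : List (List (String × String))) (m : List (String × String)) : List (List (String × String)) :=
  if (PySem.Dict.mk m).contains "content" && (8000 : Int) < PySem.Str.len ((PySem.Dict.mk m).getD "content" "") then
    out ++ [((PySem.Dict.mk m).insert "content"
      (PySem.Str.slice ((PySem.Dict.mk m).getD "content" "") none (some 8000) ++ "\n\n... [truncated to control cost]")).items]
  else out ++ [m]

def compact_history_py (history : List (List (String × String))) : (List (List (String × String))) × Int :=
  if history = [] then ([], 0) else
  let keep_idx := pvAwalk history (PySem.List.pyRange ((history.length : Int) - 1) (-1) (-1)) 0 0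
  let older := PySem.List.slice history none (some keep_idx)
  let recent := PySem.List.slice history (some keep_idx) none
  let trimmed_older_count : Int := (older.length : Int)
  let out : List (List (String × String)) :=
    if older ≠ [] then
      let topics := older.foldl pvAtopicsStep []
      let topic_blurb := if topics ≠ [] then PySem.Str.join " · " (PySem.List.slice topics (some (-6)) none)
                         else "earlier discussion"
      [[("role", "user"),
        ("content", "[Earlier in this conversation (" ++ PySem.Int.toStr trimmed_older_count ++ " messages): " ++ topic_blurb ++ "]")],
       [("role", "assistant"), ("content", "Got it, continuing from where we left off.")]]
    else []
  (recent.foldl pvAoutStep out, trimmed_older_count)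

-- ===== PORT B =====
def pvIsU (m : List (String × String)) : Bool := (PySem.Dict.mk m).get? "role" == some "user"

-- _truncated (isinstance(c, str) = the "content" key is present; values are always str)
def pvClip (m : List (String × String)) : List (String × String) :=
  let d := PySem.Dict.mk m
  if d.contains "content" && (8000 : Int) < PySem.Str.len (d.getD "content" "") then
    (d.insert "content" (PySem.Str.slice (d.getD "content" "") none (some 8000) ++ "\n\n... [truncated to control cost]")).items
  else m

-- grouping loop body over state (preamble, turns)
def pvGroupStep (st : List (List (String × String)) × List (List (List (String × String))))
    (m : List (String × String)) :
    List (List (String × String)) × List (List (List (String × String))) :=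
  if pvIsU m then (st.1, st.2 ++ [[m]])
  else if st.2 ≠ [] then (st.1, st.2.dropLast ++ [st.2.getLastD [] ++ [m]])
  else (st.1 ++ [m], st.2)

def pvFirstLine (c : String) : String :=
  PySem.Str.slice (((PySem.Str.split? (PySem.Str.strip c) "\n").getD []).getD 0 "") none (some 80)

def compact_history_py_alt (history : List (List (String × String))) : (List (List (String × String))) × Int :=
  if history = [] then ([], 0) else
  let st := history.foldl pvGroupStep ([], [])
  let turns := st.2
  -- (dropped, older, recent)
  let tri : List (List (List (String × String))) × List (List (String × String)) × List (List (String × String)) :=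
    if 8 ≤ (turns.length : Int) then
      let dropped := PySem.List.slice turns none (some ((turns.length : Int) - 8))
      (dropped, st.1 ++ dropped.flatten,
        (PySem.List.slice turns (some ((turns.length : Int) - 8)) none).flatten)
    else ([], [], history)
  let dropped := tri.1
  let older := tri.2.1
  let recent := tri.2.2
  let out : List (List (String × String)) :=
    if older ≠ [] then
      -- topics from the opening message of each dropped turn (isinstance str: always true)
      let topics := dropped.map (fun t =>
        pvFirstLine ((PySem.Dict.mk ((PySem.List.pyGet? t 0).getD [])).getD "content" ""))
      let blurb := if topics ≠ [] then PySem.Str.join " · " (PySem.List.slice topics (some (-6)) none)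
                   else "earlier discussion"
      [[("role", "user"),
        ("content", "[Earlier in this conversation (" ++ PySem.Int.toStr ((older.length : Int)) ++ " messages): " ++ blurb ++ "]")],
       [("role", "assistant"), ("content", "Got it, continuing from where we left off.")]]
    else []
  (out ++ recent.map pvClip, (older.length : Int))

-- ===== PRECONDITION & SPEC =====
def Spec_compact_history_py (history : List (List (String × String))) (out : (List (List (String × String))) × Int) : Prop := out = compact_history_py_alt history
instance (history : List (List (String × String))) (out : (List (List (String × String))) × Int) : Decidable (Spec_compact_history_py history out) := by unfold Spec_compact_history_py; infer_instance

-- ===== CLAIM (what is proved, stated in full; the proofs are below) =====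
def Claim_equal_compact_history_py : Prop := ∀ (history : List (List (String × String))), Dom_compact_history_py history → Spec_compact_history_py history (compact_history_py history)


-- ===== LEMMAS AND PROOFS =====

def pvIsUserAt (history : List (List (String × String))) (i : Int) : Bool :=
  (PySem.Dict.mk (PySem.List.pyGetD history i [])).get? "role" == some "user"

-- characterisation of A's backward walk over an arbitrary index list
theorem pvAwalk_eq (history : List (List (String × String))) :
    ∀ (idxs : List Int) (k u : Int), 0 ≤ u → u ≤ 7 →
      pvAwalk history idxs k u =
        (if 8 ≤ u + ((idxs.filter (pvIsUserAt history)).length : Int)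
         then (idxs.filter (pvIsUserAt history)).getD (7 - u).toNat 0 else k) := by
  intro idxs
  induction idxs with
  | nil =>
    intro k u h0 h7
    rw [pvAwalk, List.filter_nil]
    rw [if_neg (by simp; omega)]
  | cons i rest ih =>
    intro k u h0 h7
    by_cases hu : pvIsUserAt history i
    · rw [pvAwalk]
      simp only [pvIsUserAt] at hu
      rw [if_pos hu, List.filter_cons_of_pos (by simpa [pvIsUserAt] using hu)]
      by_cases h8 : 8 ≤ u + 1
      · rw [if_pos h8, if_pos (by simp only [List.length_cons]; push_cast; omega)]
        have hu7 : u = 7 := by omega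
        subst hu7
        norm_num
      · rw [if_neg h8, ih k (u + 1) (by omega) (by omega)]
        by_cases hc : 8 ≤ u + 1 + ((rest.filter (pvIsUserAt history)).length : Int)
        · rw [if_pos hc, if_pos (by simp only [List.length_cons]; push_cast; omega)]
          have hn : (7 - u).toNat = (7 - (u + 1)).toNat + 1 := by omega
          rw [hn, List.getD_cons_succ]
        · rw [if_neg hc, if_neg (by simp only [List.length_cons]; push_cast; omega)]
    · rw [pvAwalk]
      simp only [pvIsUserAt] at hu
      rw [if_neg hu, List.filter_cons_of_neg (by simpa [pvIsUserAt] using hu)]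
      exact ih k u h0 h7

-- right-to-left segmentation: (preamble, user-led turns)
def pvSegR : List (List (String × String)) →
    List (List (String × String)) × List (List (List (String × String)))
  | [] => ([], [])
  | m :: rest =>
    let pr := pvSegR rest
    if pvIsU m then ([], (m :: pr.1) :: pr.2) else (m :: pr.1, pr.2)

-- B's grouping foldl computes pvSegR (nonempty-turns state)
theorem pv_group_foldl_ne (l : List (List (String × String))) :
    ∀ (P : List (List (String × String))) (TS : List (List (List (String × String))))
      (last : List (List (String × String))),
      l.foldl pvGroupStep (P, TS ++ [last]) =
        (P, TS ++ ((last ++ (pvSegR l).1) :: (pvSegR l).2)) := by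
  induction l with
  | nil => intro P TS last; simp [pvSegR]
  | cons m rest ih =>
    intro P TS last
    rw [List.foldl_cons]
    by_cases hu : pvIsU m
    · have hstep : pvGroupStep (P, TS ++ [last]) m = (P, (TS ++ [last]) ++ [[m]]) := by
        simp [pvGroupStep, hu]
      rw [hstep, ih P (TS ++ [last]) [m]]
      simp [pvSegR, hu]
    · have hstep : pvGroupStep (P, TS ++ [last]) m = (P, TS ++ [last ++ [m]]) := by
        simp [pvGroupStep, hu]
      rw [hstep, ih P TS (last ++ [m])]
      simp [pvSegR, hu]
  
-- B's grouping foldl from the empty state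
theorem pv_group_foldl (l : List (List (String × String))) :
    ∀ (P : List (List (String × String))),
      l.foldl pvGroupStep (P, []) = (P ++ (pvSegR l).1, (pvSegR l).2) := by
  induction l with
  | nil => intro P; simp [pvSegR]
  | cons m rest ih =>
    intro P
    rw [List.foldl_cons]
    by_cases hu : pvIsU m
    · have hstep : pvGroupStep (P, ([] : List (List (List (String × String))))) m
          = (P, [] ++ [[m]]) := by simp [pvGroupStep, hu]
      rw [hstep, pv_group_foldl_ne rest P [] [m]]
      simp [pvSegR, hu]
    · have hstep : pvGroupStep (P, ([] : List (List (List (String × String))))) m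
          = (P ++ [m], []) := by simp [pvGroupStep, hu]
      rw [hstep, ih (P ++ [m])]
      simp [pvSegR, hu]

-- segmentation structure
theorem pvSegR_flat (l : List (List (String × String))) :
    (pvSegR l).1 ++ (pvSegR l).2.flatten = l := by
  induction l with
  | nil => rfl
  | cons m rest ih =>
    by_cases hu : pvIsU m <;> simp [pvSegR, hu, ih]

theorem pvSegR_pre_noU (l : List (List (String × String))) :
    ∀ m ∈ (pvSegR l).1, pvIsU m = false := by
  induction l with
  | nil => simp [pvSegR]
  | cons m rest ih =>
    by_cases hu : pvIsU m <;> simp_all [pvSegR]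

theorem pvSegR_turn_shape (l : List (List (String × String))) :
    ∀ t ∈ (pvSegR l).2, ∃ h tl, t = h :: tl ∧ pvIsU h = true ∧ ∀ x ∈ tl, pvIsU x = false := by
  induction l with
  | nil => simp [pvSegR]
  | cons m rest ih =>
    by_cases hu : pvIsU m
    · intro t ht
      simp only [pvSegR, hu, if_pos] at ht
      rcases List.mem_cons.mp ht with h1 | h2
      · exact ⟨m, (pvSegR rest).1, h1, hu, pvSegR_pre_noU rest⟩
      · exact ih t h2
    · intro t ht
      simp only [pvSegR, hu] at ht
      exact ih t ht

-- user indices, front to back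
def pvRn : List (List (String × String)) → List Nat
  | [] => []
  | m :: rest => if pvIsU m then 0 :: (pvRn rest).map (· + 1) else (pvRn rest).map (· + 1)

theorem pvRn_len (l : List (List (String × String))) :
    (pvRn l).length = (pvSegR l).2.length := by
  induction l with
  | nil => rfl
  | cons m rest ih =>
    by_cases hu : pvIsU m <;> simp [pvRn, pvSegR, hu, ih]

theorem pvRn_getD (l : List (List (String × String))) :
    ∀ j, j < (pvRn l).length →
      (pvRn l).getD j 0 = (pvSegR l).1.length + (((pvSegR l).2.take j).flatten).length := by
  induction l with
  | nil => simp [pvRn]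
  | cons m rest ih =>
    intro j hj
    by_cases hu : pvIsU m
    · simp only [pvRn, hu, if_pos] at hj ⊢
      cases j with
      | zero => simp [pvSegR, hu]
      | succ j =>
        have hj' : j < (pvRn rest).length := by simpa using hj
        have hmap : ((pvRn rest).map (· + 1)).getD j 0 = (pvRn rest).getD j 0 + 1 := by
          rw [List.getD_eq_getElem?_getD, List.getD_eq_getElem?_getD, List.getElem?_map,
              List.getElem?_eq_getElem hj']
          simp
        rw [List.getD_cons_succ, hmap, ih j hj']
        simp only [pvSegR, hu, if_pos, List.take_succ_cons, List.flatten_cons,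
          List.length_append, List.length_nil, List.length_cons]
        omega
    · simp only [pvRn, hu, if_neg, Bool.false_eq_true, not_false_iff] at hj ⊢
      have hj' : j < (pvRn rest).length := by simpa using hj
      have hmap : ((pvRn rest).map (· + 1)).getD j 0 = (pvRn rest).getD j 0 + 1 := by
        rw [List.getD_eq_getElem?_getD, List.getD_eq_getElem?_getD, List.getElem?_map,
            List.getElem?_eq_getElem hj']
        simp
      rw [hmap, ih j hj']
      simp [pvSegR, hu]
      omega

theorem pvRn_eq_filter_range (l : List (List (String × String))) :
    pvRn l = (List.range l.length).filter (fun k => pvIsU (l.getD k [])) := by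
  induction l with
  | nil => rfl
  | cons m rest ih =>
    rw [List.length_cons, List.range_succ_eq_map, List.filter_cons, List.filter_map]
    have hfun : ((fun k => pvIsU ((m :: rest).getD k [])) ∘ Nat.succ)
        = fun k => pvIsU (rest.getD k []) := by
      funext k; simp
    rw [hfun, ← ih]
    by_cases hu : pvIsU m <;>
      simp [pvRn, hu]

-- A's filtered index range is pvRn cast to Int
theorem pv_filter_range_eq (l : List (List (String × String))) :
    (PySem.List.pyRange 0 ((l.length : Int))).filter (pvIsUserAt l)
      = (pvRn l).map (fun n : Nat => (n : Int)) := by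
  rw [PySem.List.pyRange_one, List.filter_map]
  have hfun : (pvIsUserAt l ∘ fun k : Nat => (0 : Int) + (k : Int))
      = fun k : Nat => pvIsU (l.getD k []) := by
    funext k
    simp [pvIsUserAt, pvIsU, PySem.List.pyGetD_natCast]
  rw [hfun]
  have hlen : ((l.length : Int) - 0).toNat = l.length := by omega
  rw [hlen, ← pvRn_eq_filter_range]
  simp

-- A's keep_idx in terms of the segmentation
theorem pv_keep_eq (l : List (List (String × String))) :
    pvAwalk l (PySem.List.pyRange ((l.length : Int) - 1) (-1) (-1)) 0 0
      = (if 8 ≤ ((pvSegR l).2.length : Int)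
         then (((pvSegR l).1.length + (((pvSegR l).2.take ((pvSegR l).2.length - 8)).flatten).length : Nat) : Int)
         else 0) := by
  have hrange : PySem.List.pyRange ((l.length : Int) - 1) (-1) (-1)
      = (PySem.List.pyRange 0 (l.length : Int)).reverse := by
    rw [PySem.List.pyRange_neg_one_eq_reverse]
    norm_num
  rw [hrange, pvAwalk_eq l _ 0 0 (by omega) (by omega), List.filter_reverse, pv_filter_range_eq]
  set L := (pvSegR l).2.length with hL
  by_cases h8 : 8 ≤ (L : Int)
  · have hlenRn : (pvRn l).length = L := pvRn_len l
    have hlen8 : 8 ≤ L := by exact_mod_cast h8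
    rw [if_pos (by simp [List.length_reverse, List.length_map, hlenRn]; omega), if_pos h8]
    have h7 : ((7 : Int) - 0).toNat = 7 := by decide
    rw [h7, List.getD_eq_getElem?_getD, List.getElem?_reverse (by simp [hlenRn]; omega)]
    simp only [List.length_map, hlenRn]
    rw [List.getElem?_map, List.getElem?_eq_getElem (by omega : L - 1 - 7 < (pvRn l).length)]
    have hget := pvRn_getD l (L - 1 - 7) (by omega)
    rw [List.getD_eq_getElem?_getD, List.getElem?_eq_getElem (by omega : L - 1 - 7 < (pvRn l).length)] at hget
    simp only [Option.getD_some] at hget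
    simp only [Option.map_some, Option.getD_some]
    rw [hget, show L - 1 - 7 = L - 8 from by omega]
  · have hlenRn : (pvRn l).length = L := pvRn_len l
    rw [if_neg (by simp [List.length_reverse, List.length_map, hlenRn]; omega), if_neg h8]

-- per-element: A's truncation branch is pvClip
theorem pvAoutStep_eq (out : List (List (String × String))) (m : List (String × String)) :
    pvAoutStep out m = out ++ [pvClip m] := by
  simp only [pvAoutStep, pvClip]
  split_ifs <;> rfl

theorem pv_foldl_out (recent : List (List (String × String))) (out : List (List (String × String))) :
    recent.foldl pvAoutStep out = out ++ recent.map pvClip := by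
  induction recent generalizing out with
  | nil => simp
  | cons x xs ih => rw [List.foldl_cons, pvAoutStep_eq, ih, List.map_cons]; simp

theorem pv_foldl_filterMap {α β : Type} (p : α → Bool) (f : α → β) (l : List α) (acc : List β) :
    l.foldl (fun a m => if p m then a ++ [f m] else a) acc
      = acc ++ l.filterMap (fun m => if p m then some (f m) else none) := by
  induction l generalizing acc with
  | nil => simp
  | cons x xs ih =>
    by_cases h : p x <;> simp [List.foldl_cons, h, ih]

theorem pvAtopics_eq (older : List (List (String × String))) :
    older.foldl pvAtopicsStep []
      = older.filterMap (fun m =>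
          if pvIsU m then some (pvFirstLine ((PySem.Dict.mk m).getD "content" "")) else none) := by
  have hfun : pvAtopicsStep = fun (t : List String) m =>
      if pvIsU m then t ++ [pvFirstLine ((PySem.Dict.mk m).getD "content" "")] else t := by
    funext t m
    simp only [pvAtopicsStep, pvFirstLine, pvIsU]
  rw [hfun, pv_foldl_filterMap (fun m => pvIsU m)
    (fun m => pvFirstLine ((PySem.Dict.mk m).getD "content" ""))]
  exact List.nil_append _

-- topics from a non-user prefix vanish
theorem pv_topics_noU (p : List (List (String × String))) (hp : ∀ m ∈ p, pvIsU m = false) :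
    p.filterMap (fun m =>
      if pvIsU m then some (pvFirstLine ((PySem.Dict.mk m).getD "content" "")) else none) = [] := by
  induction p with
  | nil => rfl
  | cons m rest ih =>
    have hm := hp m (by simp)
    rw [List.filterMap_cons, if_neg (by simp [hm])]
    exact ih (fun x hx => hp x (by simp [hx]))

-- topics from a flattened list of user-led turns are the turn heads' first lines
theorem pv_topics_turns (ts : List (List (List (String × String))))
    (hts : ∀ t ∈ ts, ∃ h tl, t = h :: tl ∧ pvIsU h = true ∧ ∀ x ∈ tl, pvIsU x = false) :
    ts.flatten.filterMap (fun m =>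
        if pvIsU m then some (pvFirstLine ((PySem.Dict.mk m).getD "content" "")) else none)
      = ts.map (fun t =>
          pvFirstLine ((PySem.Dict.mk ((PySem.List.pyGet? t 0).getD [])).getD "content" "")) := by
  induction ts with
  | nil => rfl
  | cons t rest ih =>
    obtain ⟨h, tl, rfl, hh, htl⟩ := hts t (by simp)
    rw [List.flatten_cons, List.filterMap_append, List.map_cons]
    rw [ih (fun t' ht' => hts t' (by simp [ht']))]
    rw [List.filterMap_cons, if_pos (by simp [hh])]
    rw [pv_topics_noU tl htl]
    simp

-- common normal form of both programs on nonempty input (proof helper)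
def pvCommon (l : List (List (String × String))) : (List (List (String × String))) × Int :=
  let P := (pvSegR l).1
  let TS := (pvSegR l).2
  let L := TS.length
  if 8 ≤ (L : Int) then
    let dropped := TS.take (L - 8)
    let older := P ++ dropped.flatten
    let recent := (TS.drop (L - 8)).flatten
    let out : List (List (String × String)) :=
      if older ≠ [] then
        let topics := dropped.map (fun t =>
          pvFirstLine ((PySem.Dict.mk ((PySem.List.pyGet? t 0).getD [])).getD "content" ""))
        let blurb := if topics ≠ [] then PySem.Str.join " · " (PySem.List.slice topics (some (-6)) none)
                     else "earlier discussion"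
        [[("role", "user"),
          ("content", "[Earlier in this conversation (" ++ PySem.Int.toStr ((older.length : Int)) ++ " messages): " ++ blurb ++ "]")],
         [("role", "assistant"), ("content", "Got it, continuing from where we left off.")]]
      else []
    (out ++ recent.map pvClip, (older.length : Int))
  else (l.map pvClip, 0)

theorem pv_flatten_split (TS : List (List (List (String × String)))) (k : Nat) :
    TS.flatten = (TS.take k).flatten ++ (TS.drop k).flatten := by
  rw [← List.flatten_append, List.take_append_drop]

theorem pvB_eval (l : List (List (String × String))) (hnil : l ≠ []) :
    compact_history_py_alt l = pvCommon l := by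
  unfold compact_history_py_alt pvCommon
  rw [if_neg hnil, pv_group_foldl l []]
  simp only [List.nil_append]
  by_cases h8 : 8 ≤ (((pvSegR l).2.length : Int))
  · rw [if_pos h8, if_pos h8]
    have hk : ((pvSegR l).2.length : Int) - 8 = (((pvSegR l).2.length - 8 : Nat) : Int) := by
      omega
    rw [hk, PySem.List.slice_to_natCast, PySem.List.slice_from_natCast]
  · rw [if_neg h8, if_neg h8]
    simp

theorem pvA_eval (l : List (List (String × String))) (hnil : l ≠ []) :
    compact_history_py l = pvCommon l := by
  unfold compact_history_py pvCommon
  rw [if_neg hnil, pv_keep_eq l]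
  by_cases h8 : 8 ≤ (((pvSegR l).2.length : Int))
  · rw [if_pos h8, if_pos h8]
    simp only [ne_eq]
    set P := (pvSegR l).1 with hP
    set TS := (pvSegR l).2 with hTS
    set L := TS.length with hL
    set X := (TS.take (L - 8)).flatten with hX
    set Y := (TS.drop (L - 8)).flatten with hY
    have hlsplit : l = (P ++ X) ++ Y := by
      rw [List.append_assoc, hX, hY, ← pv_flatten_split TS (L - 8), hP, hTS, pvSegR_flat]
    have holder : PySem.List.slice l none (some ((P.length + X.length : Nat) : Int)) = P ++ X := by
      rw [PySem.List.slice_to_natCast, hlsplit,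
        show P.length + X.length = (P ++ X).length from by simp, List.take_left]
    have hrecent : PySem.List.slice l (some ((P.length + X.length : Nat) : Int)) none = Y := by
      rw [PySem.List.slice_from_natCast, hlsplit,
        show P.length + X.length = (P ++ X).length from by simp, List.drop_left]
    rw [holder, hrecent, pv_foldl_out]
    have htopics : (P ++ X).foldl pvAtopicsStep []
        = (TS.take (L - 8)).map (fun t =>
            pvFirstLine ((PySem.Dict.mk ((PySem.List.pyGet? t 0).getD [])).getD "content" "")) := by
      rw [pvAtopics_eq, List.filterMap_append, pv_topics_noU P (pvSegR_pre_noU l),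
        pv_topics_turns (TS.take (L - 8))
          (fun t ht => pvSegR_turn_shape l t (List.mem_of_mem_take ht))]
      exact List.nil_append _
    rw [htopics]
  · rw [if_neg h8, if_neg h8]
    simp only [ne_eq]
    have h0 : PySem.List.slice l none (some (0 : Int)) = [] := by
      simp [pysem, PySem.List.slice, PySem.List.clampIdx]
    have h0' : PySem.List.slice l (some (0 : Int)) none = l := by
      simp [pysem]
    rw [h0, h0', pv_foldl_out]
    simp

-- ===== VERDICT (by name: the statement is the Claim_ definition above) =====
theorem compact_history_py_spec : Claim_equal_compact_history_py := by
  intro l _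
  unfold Spec_compact_history_py
  by_cases hnil : l = []
  · subst hnil; rfl
  · rw [pvA_eval l hnil, pvB_eval l hnil]
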